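-- pv_equiv track=rewrite | github.com/Minh-Tam-Solution/sdlc-orchestrator1 | scripts/test-all-api-endpoints.py | replace_path_params
-- ===== SOURCE A (Python) =====
-- def replace_path_params(path: str) -> str:
--     """Replace path parameters with test values"""
--     replacements = {
--         "{id}": "1",
--         "{gate_id}": "1",
--         "{project_id}": "1",
--         "{user_id}": "1",
--         "{definition_id}": "1",
--         "{conversation_id}": "1",
--         "{session_id}": "1",
--         "{provider}": "ollama",
--         "{breaker_name}": "test",
--         "{key}": "test_key",
--         "{scan_id}": "1",
--         "{roadmap_id}": "1",
--         "{phase_id}": "1",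
--         "{sprint_id}": "1",
--         "{item_id}": "1",
--         "{message_id}": "1"
--     }
--
--     for param, value in replacements.items():
--         path = path.replace(param, value)
--
--     return path
-- ===== SOURCE B (Python) =====
-- import re
--
-- _REPLACEMENTS = {
--     "{id}": "1",
--     "{gate_id}": "1",
--     "{project_id}": "1",
--     "{user_id}": "1",
--     "{definition_id}": "1",
--     "{conversation_id}": "1",
--     "{session_id}": "1",
--     "{provider}": "ollama",
--     "{breaker_name}": "test",
--     "{key}": "test_key",
--     "{scan_id}": "1",
--     "{roadmap_id}": "1",
--     "{phase_id}": "1",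
--     "{sprint_id}": "1",
--     "{item_id}": "1",
--     "{message_id}": "1",
-- }
--
-- _PLACEHOLDER = re.compile(r"\{(\w+)\}")
--
--
-- def replace_path_params(path: str) -> str:
--     """Replace path parameters with test values"""
--     return _PLACEHOLDER.sub(
--         lambda m: _REPLACEMENTS.get(m.group(0), m.group(0)), path
--     )
-- ===== Notes on version B (the rewrite author's own statement) =====
-- stated objective: idiomatic
-- what changed: Replaces the 16 sequential full-string str.replace passes with a single left-to-right regex scan (re.sub on a brace-word-brace pattern) whose callback resolves each placeholder by one dict lookup, leaving unknown placeholders unchanged.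
import Mathlib
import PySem

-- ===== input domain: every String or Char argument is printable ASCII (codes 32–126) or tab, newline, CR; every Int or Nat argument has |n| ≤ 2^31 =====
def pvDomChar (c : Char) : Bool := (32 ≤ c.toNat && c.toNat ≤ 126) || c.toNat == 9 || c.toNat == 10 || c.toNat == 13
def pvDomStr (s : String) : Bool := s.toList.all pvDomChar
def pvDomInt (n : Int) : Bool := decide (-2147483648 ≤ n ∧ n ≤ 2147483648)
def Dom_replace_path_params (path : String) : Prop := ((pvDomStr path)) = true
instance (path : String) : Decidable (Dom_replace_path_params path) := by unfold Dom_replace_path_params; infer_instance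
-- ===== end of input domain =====

-- B replaces A's 16 sequential full-string str.replace passes with one left-to-right
-- regex-style scan that resolves each "{word}" placeholder by a single table lookup (idiomatic).

-- ===== PORT A =====
-- the dict literal `replacements` (insertion order)
def pvReplacementsA : PySem.Dict String String := PySem.Dict.ofList
  [("{id}", "1"), ("{gate_id}", "1"), ("{project_id}", "1"), ("{user_id}", "1"),
   ("{definition_id}", "1"), ("{conversation_id}", "1"), ("{session_id}", "1"),
   ("{provider}", "ollama"), ("{breaker_name}", "test"), ("{key}", "test_key"),
   ("{scan_id}", "1"), ("{roadmap_id}", "1"), ("{phase_id}", "1"), ("{sprint_id}", "1"),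
   ("{item_id}", "1"), ("{message_id}", "1")]

-- `for param, value in replacements.items(): path = path.replace(param, value)`
def replace_path_params (path : String) : String :=
  pvReplacementsA.items.foldl (fun p kv => PySem.Str.replace p kv.1 kv.2) path

-- ===== PORT B =====
-- `\w` of Source B's regex, on the ASCII domain (Dom): [A-Za-z0-9_]
def pvWord (c : Char) : Bool :=
  ('a' ≤ c && c ≤ 'z') || ('A' ≤ c && c ≤ 'Z') || ('0' ≤ c && c ≤ '9') || c == '_'

-- the dict `_REPLACEMENTS` of Source B, as an association list over code points
def pvRepl : List (List Char × List Char) :=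
  [("{id}".toList, "1".toList), ("{gate_id}".toList, "1".toList),
   ("{project_id}".toList, "1".toList), ("{user_id}".toList, "1".toList),
   ("{definition_id}".toList, "1".toList), ("{conversation_id}".toList, "1".toList),
   ("{session_id}".toList, "1".toList), ("{provider}".toList, "ollama".toList),
   ("{breaker_name}".toList, "test".toList), ("{key}".toList, "test_key".toList),
   ("{scan_id}".toList, "1".toList), ("{roadmap_id}".toList, "1".toList),
   ("{phase_id}".toList, "1".toList), ("{sprint_id}".toList, "1".toList),
   ("{item_id}".toList, "1".toList), ("{message_id}".toList, "1".toList)]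

-- `_REPLACEMENTS.get(m.group(0), m.group(0))`
def pvGetD (m : List Char) : List Char := (List.lookup m pvRepl).getD m

-- hand port of `re.sub(r"\{(\w+)\}", repl, path)`: a left-to-right scan; at a '{' the
-- pattern matches iff the maximal \w+ run after it is nonempty and followed by '}'
-- (greedy \w+ cannot backtrack into a '}'); on a match the callback's value is emitted
-- and scanning resumes after the match, otherwise the character is copied.
-- Exact for this pattern on the ASCII domain (Dom).
def pvSub : List Char → List Char
  | [] => []
  | c :: t =>
    if c = '{' then
      if (t.takeWhile pvWord) ≠ [] ∧ (t.drop (t.takeWhile pvWord).length).head? = some '}' then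
        pvGetD ('{' :: t.takeWhile pvWord ++ ['}']) ++ pvSub (t.drop ((t.takeWhile pvWord).length + 1))
      else '{' :: pvSub t
    else c :: pvSub t
termination_by l => l.length
decreasing_by
  · simp
  · simp
  · simp

def replace_path_params_alt (path : String) : String := String.ofList (pvSub path.toList)

-- ===== PRECONDITION & SPEC =====
def Spec_replace_path_params (path : String) (out : String) : Prop := out = replace_path_params_alt path
instance (path : String) (out : String) : Decidable (Spec_replace_path_params path out) := by unfold Spec_replace_path_params; infer_instance

-- ===== CLAIM (what is proved, stated in full; the proofs are below) =====
def Claim_equal_replace_path_params : Prop := ∀ (path : String), Dom_replace_path_params path → Spec_replace_path_params path (replace_path_params path)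

-- ===== LEMMAS AND PROOFS =====

-- Structural characterization of Python's leftmost str.replace (PySem.Chars.replace).
def repS (k v : List Char) : List Char → List Char
  | [] => []
  | c :: t =>
    if k.isPrefixOf (c :: t) then v ++ repS k v (t.drop (k.length - 1))
    else c :: repS k v t
termination_by l => l.length
decreasing_by
  · simp
  · simp

lemma go_eq_repS (k v : List Char) (hk : k ≠ []) :
    ∀ (fuel : Nat) (l acc : List Char), l.length ≤ fuel →
      PySem.Chars.replace.go k v fuel l acc = acc.reverse ++ repS k v l := by
  intro fuel
  induction fuel with
  | zero =>
    intro l acc h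
    have hl : l = [] := List.eq_nil_of_length_eq_zero (Nat.le_zero.mp h)
    subst hl
    rw [PySem.Chars.replace.go, repS]
  | succ n ih =>
    intro l acc h
    cases l with
    | nil =>
      rw [PySem.Chars.replace.go]
      all_goals first
      | (rw [repS]; simp)
      | omega
    | cons c t =>
      by_cases hp : k.isPrefixOf (c :: t) = true
      · rw [PySem.Chars.replace.go]
        simp only [hp, if_true]
        have h1 : 1 ≤ k.length := by
          cases k with
          | nil => exact absurd rfl hk
          | cons a b => simp
        have hlen : (List.drop k.length (c :: t)).length ≤ n := by
          simp only [List.length_drop, List.length_cons] at h ⊢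
          omega
        rw [ih _ _ hlen]
        have hdrop : List.drop k.length (c :: t) = t.drop (k.length - 1) := by
          cases k with
          | nil => exact absurd rfl hk
          | cons a b => simp
        rw [hdrop, repS, if_pos hp]
        simp
      · rw [PySem.Chars.replace.go]
        simp only [hp]
        have hlen : t.length ≤ n := by simp at h; omega
        rw [ih _ _ hlen, repS, if_neg hp]
        simp

lemma replace_eq_repS (s k v : List Char) (hk : k ≠ []) :
    PySem.Chars.replace s k v = repS k v s := by
  rw [PySem.Chars.replace]
  have : k.isEmpty = false := by cases k with | nil => exact absurd rfl hk | cons a b => rfl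
  rw [this]
  simpa using go_eq_repS k v hk s.length s [] (le_refl _)

-- the chain of replaces of A, on code points
def chainR (ps : List (List Char × List Char)) (s : List Char) : List Char :=
  ps.foldl (fun acc p => repS p.1 p.2 acc) s

lemma chainR_cons (p : List Char × List Char) (ps : List (List Char × List Char)) (s : List Char) :
    chainR (p :: ps) s = chainR ps (repS p.1 p.2 s) := rfl

-- key shape: '{' ++ nonempty word run ++ '}'
def pvName (k : List Char) : List Char := (k.drop 1).dropLast
def pvKeyShape (k : List Char) : Prop :=
  pvName k ≠ [] ∧ (pvName k).all pvWord = true ∧ k = '{' :: pvName k ++ ['}']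

lemma keyShape_elim {k : List Char} (h : pvKeyShape k) :
    pvName k ≠ [] ∧ (pvName k).all pvWord = true ∧ k = '{' :: pvName k ++ ['}'] := h

-- finite facts about the fixed table, checked by kernel evaluation
lemma pl_shapes : ∀ p ∈ pvRepl, pvKeyShape p.1 ∧ p.2.all pvWord = true := by
  unfold pvKeyShape; decide

lemma pl_noinfix : ∀ p ∈ pvRepl, ∀ q ∈ pvRepl, ¬ p.2 <:+: pvName q.1 := by decide

lemma word_ne_brace {c : Char} (h : pvWord c = true) : c ≠ '{' := by
  intro hc; subst hc; simp [pvWord] at h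
lemma word_ne_rbrace {c : Char} (h : pvWord c = true) : c ≠ '}' := by
  intro hc; subst hc; simp [pvWord] at h

lemma repS_nil (k v : List Char) : repS k v [] = [] := by rw [repS]

lemma repS_cons_not_pref {k : List Char} (v : List Char) {c : Char} {t : List Char}
    (h : ¬ k.isPrefixOf (c :: t) = true) : repS k v (c :: t) = c :: repS k v t := by
  rw [repS, if_neg h]

lemma repS_cons_ne {k : List Char} (v : List Char) {c : Char} {t : List Char}
    (hK : pvKeyShape k) (hc : c ≠ '{') : repS k v (c :: t) = c :: repS k v t := by
  apply repS_cons_not_pref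
  intro h
  rw [List.isPrefixOf_iff_prefix] at h
  rw [(keyShape_elim hK).2.2] at h
  rcases h with ⟨r, hr⟩
  simp at hr
  exact hc hr.1.symm

lemma repS_match {k : List Char} (v : List Char) (x : List Char) (hk : k ≠ []) :
    repS k v (k ++ x) = v ++ repS k v x := by
  cases k with
  | nil => exact absurd rfl hk
  | cons a t =>
    have hp : (a :: t).isPrefixOf (a :: (t ++ x)) = true := by
      rw [List.isPrefixOf_iff_prefix]; exact ⟨x, by simp⟩
    rw [List.cons_append, repS, if_pos hp]
    congr 1
    have h1 : (a :: t).length - 1 = t.length := by simp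
    rw [h1, List.drop_left]

-- a prefix containing no '{' passes through a single replace
lemma repS_pass {k : List Char} (v : List Char) (hK : pvKeyShape k) :
    ∀ (p x : List Char), '{' ∉ p → repS k v (p ++ x) = p ++ repS k v x := by
  intro p
  induction p with
  | nil => intro x _; simp
  | cons c p' ih =>
    intro x hc
    have hcne : c ≠ '{' := fun h => hc (h ▸ List.mem_cons_self)
    rw [List.cons_append, repS_cons_ne v hK hcne, ih x (fun h => hc (List.mem_cons_of_mem _ h))]
    simp

-- two word runs closed by '}' at the same start coincide
lemma words_eq : ∀ (n w x : List Char), n.all pvWord = true → w.all pvWord = true →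
    (n ++ ['}']) <+: (w ++ '}' :: x) → n = w := by
  intro n
  induction n with
  | nil =>
    intro w x _ hw h
    cases w with
    | nil => rfl
    | cons b w' =>
      rcases h with ⟨r, hr⟩
      simp at hr
      simp only [List.all_cons, Bool.and_eq_true] at hw
      exact absurd hr.1.symm (word_ne_rbrace hw.1)
  | cons a n' ih =>
    intro w x hn hw h
    simp only [List.all_cons, Bool.and_eq_true] at hn
    cases w with
    | nil =>
      rcases h with ⟨r, hr⟩
      simp at hr
      exact absurd hr.1 (word_ne_rbrace hn.1)
    | cons b w' =>
      rcases h with ⟨r, hr⟩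
      simp at hr
      obtain ⟨hab, hrest⟩ := hr
      simp only [List.all_cons, Bool.and_eq_true] at hw
      have : n' = w' := by
        apply ih w' x hn.2 hw.2
        exact ⟨r, by simpa using hrest⟩
      rw [hab, this]

-- splitting a word-closed prefix across a word block
lemma word_prefix_split : ∀ (v n R : List Char), v.all pvWord = true →
    (n ++ ['}']) <+: (v ++ R) → v <+: n ∧ ((n.drop v.length) ++ ['}']) <+: R := by
  intro v
  induction v with
  | nil => intro n R _ h; simpa using h
  | cons b v' ih =>
    intro n R hv h
    simp only [List.all_cons, Bool.and_eq_true] at hv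
    cases n with
    | nil =>
      rcases h with ⟨r, hr⟩
      simp at hr
      exact absurd hr.1.symm (word_ne_rbrace hv.1)
    | cons a n' =>
      rcases h with ⟨r, hr⟩
      simp at hr
      obtain ⟨hab, hrest⟩ := hr
      have h' := ih n' R hv.2 ⟨r, by simpa using hrest⟩
      refine ⟨?_, ?_⟩
      · rcases h'.1 with ⟨s, hs⟩
        exact ⟨s, by simp [hab, hs]⟩
      · simpa using h'.2

-- KEY LEMMA: a replace from the table never creates a "name}" prefix
-- (q ranges over suffixes of table names)
lemma no_create {k v : List Char} (_hK : pvKeyShape k) (hv : v.all pvWord = true)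
    (hnv : ∀ p ∈ pvRepl, ¬ v <:+: pvName p.1) :
    ∀ (u q : List Char), q.all pvWord = true → (∃ p ∈ pvRepl, q <:+ pvName p.1) →
      (q ++ ['}']) <+: repS k v u → (q ++ ['}']) <+: u := by
  intro u
  induction u using repS.induct k with
  | case1 =>
    intro q _ _ h
    rw [repS_nil] at h
    rcases h with ⟨r, hr⟩
    simp at hr
  | case2 c t hp ihm =>
    intro q hq hsuf h
    rw [repS, if_pos hp] at h
    obtain ⟨hvq, -⟩ := word_prefix_split v q _ hv h
    obtain ⟨p, hpmem, hqsuf⟩ := hsuf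
    exact absurd (hvq.isInfix.trans hqsuf.isInfix) (hnv p hpmem)
  | case3 c t hp ihn =>
    intro q hq hsuf h
    rw [repS_cons_not_pref _ hp] at h
    cases q with
    | nil =>
      rcases h with ⟨r, hr⟩
      simp at hr
      exact ⟨t, by simp [← hr.1]⟩
    | cons a q' =>
      rcases h with ⟨r, hr⟩
      simp at hr
      obtain ⟨hac, hrest⟩ := hr
      simp only [List.all_cons, Bool.and_eq_true] at hq
      have hq'' : (q' ++ ['}']) <+: t := by
        apply ihn q' hq.2
        · obtain ⟨p, hpmem, hqsuf⟩ := hsuf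
          exact ⟨p, hpmem, List.IsSuffix.trans ⟨[a], rfl⟩ hqsuf⟩
        · exact ⟨r, by simpa using hrest⟩
      rcases hq'' with ⟨s, hs⟩
      exact ⟨s, by simp [hac, ← hs]⟩

-- head safety: no table name closed by '}' is a prefix
def HeadP (u : List Char) : Prop := ∀ p ∈ pvRepl, ¬ (pvName p.1 ++ ['}']) <+: u

lemma chain_brace_aux : ∀ (ps : List (List Char × List Char)) (u : List Char),
    (∀ p ∈ ps, p ∈ pvRepl) → HeadP u →
    chainR ps ('{' :: u) = '{' :: chainR ps u ∧ HeadP (chainR ps u) := by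
  intro ps
  induction ps with
  | nil => intro u _ h; exact ⟨rfl, h⟩
  | cons p ps' ih =>
    intro u hmem hH
    have hp : p ∈ pvRepl := hmem p List.mem_cons_self
    obtain ⟨hK, hv⟩ := pl_shapes p hp
    have hnp : ¬ p.1.isPrefixOf ('{' :: u) = true := by
      intro h
      rw [List.isPrefixOf_iff_prefix] at h
      rw [(keyShape_elim hK).2.2] at h
      rcases h with ⟨r, hr⟩
      simp only [List.cons_append, List.cons.injEq] at hr
      exact hH p hp ⟨r, by simpa using hr.2⟩
    have hstep : repS p.1 p.2 ('{' :: u) = '{' :: repS p.1 p.2 u :=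
      repS_cons_not_pref _ hnp
    have hH' : HeadP (repS p.1 p.2 u) := by
      intro q hq hpre
      exact hH q hq (no_create hK hv
        (fun r hr => pl_noinfix p hp r hr) u (pvName q.1)
        ((pl_shapes q hq).1).2.1 ⟨q, hq, List.suffix_rfl⟩ hpre)
    rw [chainR_cons, hstep]
    exact ih (repS p.1 p.2 u) (fun q hq => hmem q (List.mem_cons_of_mem _ hq)) hH'

-- a fully-word block passes through the whole chain
lemma chain_value : ∀ (ps : List (List Char × List Char)) (v x : List Char),
    (∀ p ∈ ps, p ∈ pvRepl) → v.all pvWord = true →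
    chainR ps (v ++ x) = v ++ chainR ps x := by
  intro ps
  induction ps with
  | nil => intro v x _ _; rfl
  | cons p ps' ih =>
    intro v x hmem hv
    have hp : p ∈ pvRepl := hmem p List.mem_cons_self
    have hnb : '{' ∉ v := by
      intro h
      exact word_ne_brace (List.all_eq_true.mp hv _ h) rfl
    rw [chainR_cons, repS_pass p.2 (pl_shapes p hp).1 v x hnb]
    exact ih v (repS p.1 p.2 x) (fun q hq => hmem q (List.mem_cons_of_mem _ hq)) hv

-- a matched token goes through the chain as its (first-match) lookup
lemma chain_token : ∀ (ps : List (List Char × List Char)) (w x : List Char),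
    (∀ p ∈ ps, p ∈ pvRepl) → w ≠ [] → w.all pvWord = true →
    chainR ps (('{' :: w ++ ['}']) ++ x) =
      ((List.lookup ('{' :: w ++ ['}']) ps).getD ('{' :: w ++ ['}'])) ++ chainR ps x := by
  intro ps
  induction ps with
  | nil => intro w x _ _ _; rfl
  | cons p ps' ih =>
    obtain ⟨pk, pv⟩ := p
    intro w x hmem hw hwall
    have hp : (pk, pv) ∈ pvRepl := hmem _ List.mem_cons_self
    have hK : pvKeyShape pk := (pl_shapes _ hp).1
    have hv : pv.all pvWord = true := (pl_shapes _ hp).2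
    have hmem' : ∀ q ∈ ps', q ∈ pvRepl := fun q hq => hmem q (List.mem_cons_of_mem _ hq)
    by_cases heq : pk = '{' :: w ++ ['}']
    · subst heq
      rw [chainR_cons]
      rw [repS_match pv x (by simp), chain_value ps' pv _ hmem' hv]
      have hlk : List.lookup ('{' :: w ++ ['}']) (('{' :: w ++ ['}'], pv) :: ps') = some pv := by
        simp [List.lookup]
      rw [hlk, Option.getD_some, chainR_cons]
    · have hnp : ¬ pk.isPrefixOf (('{' :: w ++ ['}']) ++ x) = true := by
        intro h
        rw [List.isPrefixOf_iff_prefix] at h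
        obtain ⟨hne, hnall, hk⟩ := keyShape_elim hK
        have hk : pk = '{' :: pvName pk ++ ['}'] := hk
        rw [hk] at h
        have hpre : (pvName pk ++ ['}']) <+: (w ++ '}' :: x) := by
          rcases h with ⟨r, hr⟩
          simp only [List.cons_append, List.cons.injEq, List.append_assoc] at hr
          exact ⟨r, by simpa using hr.2⟩
        have := words_eq (pvName pk) w x hnall hwall hpre
        exact heq (by rw [hk, this])
      have hnb : '{' ∉ w ++ ['}'] := by
        intro h
        rcases List.mem_append.mp h with h1 | h1
        · exact word_ne_brace (List.all_eq_true.mp hwall _ h1) rfl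
        · simp at h1
      have hstep : repS pk pv (('{' :: w ++ ['}']) ++ x) =
          ('{' :: w ++ ['}']) ++ repS pk pv x := by
        calc repS pk pv (('{' :: w ++ ['}']) ++ x)
            = repS pk pv ('{' :: ((w ++ ['}']) ++ x)) := by simp
          _ = '{' :: repS pk pv ((w ++ ['}']) ++ x) := by
              apply repS_cons_not_pref
              intro hcontra
              exact hnp (by simpa using hcontra)
          _ = '{' :: ((w ++ ['}']) ++ repS pk pv x) := by
              rw [repS_pass pv hK _ x hnb]
          _ = ('{' :: w ++ ['}']) ++ repS pk pv x := by simp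
      rw [chainR_cons]
      rw [hstep, ih w (repS pk pv x) hmem' hw hwall]
      have hbe : (('{' :: w ++ ['}']) == pk) = false :=
        beq_eq_false_iff_ne.mpr (fun h => heq h.symm)
      have hlk : List.lookup ('{' :: w ++ ['}']) ((pk, pv) :: ps') =
          List.lookup ('{' :: w ++ ['}']) ps' := by
        simp only [List.lookup]
        rw [hbe]
      rw [hlk, chainR_cons]

-- a non-'{' head passes through the chain
lemma chain_cons_ne : ∀ (ps : List (List Char × List Char)) (c : Char) (t : List Char),
    (∀ p ∈ ps, p ∈ pvRepl) → c ≠ '{' →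
    chainR ps (c :: t) = c :: chainR ps t := by
  intro ps
  induction ps with
  | nil => intro c t _ _; rfl
  | cons p ps' ih =>
    intro c t hmem hc
    have hp : p ∈ pvRepl := hmem p List.mem_cons_self
    rw [chainR_cons, repS_cons_ne p.2 (pl_shapes p hp).1 hc]
    exact ih c (repS p.1 p.2 t) (fun q hq => hmem q (List.mem_cons_of_mem _ hq)) hc

-- word runs absorb into takeWhile
lemma takeWhile_word_append (n z : List Char) (hn : n.all pvWord = true) :
    List.takeWhile pvWord (n ++ z) = n ++ List.takeWhile pvWord z := by
  induction n with
  | nil => simp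
  | cons a n' ihn =>
    simp only [List.all_cons, Bool.and_eq_true] at hn
    simp only [List.cons_append, List.takeWhile_cons, hn.1, if_true]
    rw [ihn hn.2]

-- MAIN: the 16-pass chain equals the single scan
lemma chain_eq_sub : ∀ (l : List Char), chainR pvRepl l = pvSub l := by
  intro l
  induction l using pvSub.induct with
  | case1 =>
    rw [pvSub]
    show chainR pvRepl [] = []
    induction pvRepl with
    | nil => rfl
    | cons p ps ih => rw [chainR_cons, repS_nil]; exact ih
  | case2 t htok ih =>
    obtain ⟨hw, hhead⟩ := htok
    obtain ⟨s, hs⟩ := List.takeWhile_prefix (l := t) pvWord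
    have hsd : t.drop (t.takeWhile pvWord).length = s := by
      have h2 := congrArg (List.drop (t.takeWhile pvWord).length) hs
      rw [List.drop_left] at h2
      exact h2.symm
    rw [hsd] at hhead
    cases s with
    | nil => simp at hhead
    | cons d rest =>
      have hd : d = '}' := by simpa using hhead
      subst hd
      have hrest : t.drop ((t.takeWhile pvWord).length + 1) = rest := by
        have h2 := congrArg (List.drop ((t.takeWhile pvWord).length + 1)) hs
        rw [show t.takeWhile pvWord ++ '}' :: rest =
          (t.takeWhile pvWord ++ ['}']) ++ rest by simp, List.drop_left' (by simp)] at h2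
        exact h2.symm
      have hsplit : '{' :: t = ('{' :: t.takeWhile pvWord ++ ['}']) ++ rest := by
        conv_lhs => rw [← hs]
        simp
      rw [pvSub, if_pos rfl, if_pos ⟨hw, by rw [hsd]; rfl⟩]
      rw [hsplit, chain_token pvRepl _ rest (fun p hp => hp) hw List.all_takeWhile]
      rw [hrest] at ih
      rw [hrest, ← ih]
      rfl
  | case3 t htok ih =>
    have hH : HeadP t := by
      intro p hp hpre
      obtain ⟨hne, hnall, -⟩ := keyShape_elim (pl_shapes p hp).1
      rcases hpre with ⟨z, hz⟩
      have htw : t.takeWhile pvWord = pvName p.1 := by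
        rw [← hz, List.append_assoc, takeWhile_word_append _ _ hnall]
        have h3 : List.takeWhile pvWord (['}'] ++ z) = [] := by
          simp [pvWord]
        rw [h3, List.append_nil]
      apply htok
      refine ⟨by rw [htw]; exact hne, ?_⟩
      rw [htw]
      have : t.drop (pvName p.1).length = '}' :: z := by
        rw [← hz, show (pvName p.1 ++ ['}']) ++ z = pvName p.1 ++ ('}' :: z) by simp]
        exact List.drop_left
      rw [this]
      rfl
    rw [pvSub, if_pos rfl, if_neg htok]
    rw [(chain_brace_aux pvRepl t (fun p hp => hp) hH).1]
    exact congrArg _ ih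
  | case4 c t hc ih =>
    rw [pvSub, if_neg hc]
    rw [chain_cons_ne pvRepl c t (fun p hp => hp) hc]
    exact congrArg _ ih

-- bridge from the String-level fold of A to chainR
lemma fold_toList : ∀ (ps : List (String × String)) (s : String),
    (∀ kv ∈ ps, kv.1.toList ≠ []) →
    (ps.foldl (fun p kv => PySem.Str.replace p kv.1 kv.2) s).toList =
      chainR (ps.map (fun kv => (kv.1.toList, kv.2.toList))) s.toList := by
  intro ps
  induction ps with
  | nil => intro s _; rfl
  | cons kv ps' ih =>
    intro s hne
    rw [List.foldl_cons, List.map_cons, chainR_cons,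
      ih _ (fun q hq => hne q (List.mem_cons_of_mem _ hq))]
    congr 1
    rw [PySem.Str.toList_replace,
      replace_eq_repS _ _ _ (hne kv List.mem_cons_self)]

lemma items_eq : pvReplacementsA.items.map (fun kv => (kv.1.toList, kv.2.toList)) = pvRepl := by
  decide

lemma keys_ne : ∀ kv ∈ pvReplacementsA.items, kv.1.toList ≠ [] := by decide

-- ===== VERDICT (by name: the statement is the Claim_ definition above) =====
theorem replace_path_params_spec : Claim_equal_replace_path_params := by
  intro path _
  unfold Spec_replace_path_params replace_path_params replace_path_params_alt
  apply String.toList_inj.mp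
  rw [fold_toList _ _ keys_ne, items_eq, chain_eq_sub]
  simp
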